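-- pv_equiv track=rewrite | github.com/SauravSinha76/scaler2 | class66/chocolet_kid.py | solve
-- ===== SOURCE A (Python) =====
-- import heapq
--
-- def solve(A,B):
--     B = [b * -1 for b in B]
--     heapq.heapify(B)
--     total_chocolet = 0
--     while A > 0 and len(B) > 1:
--         chocolet = heapq.heappop(B)
--         heapq.heappush(B,-(-chocolet // 2))
--         total_chocolet -= chocolet
--         A -= 1
--     return total_chocolet
-- ===== SOURCE B (Python) =====
-- def solve(A, B):
--     C = list(B)
--     total = 0
--     while A > 0 and len(C) > 1:
--         m = C[0]
--         for x in C[1:]: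
--             if x > m:
--                 m = x
--         i = C.index(m)
--         C[i] = m // 2
--         total += m
--         A -= 1
--     return total
-- ===== Notes on version B (the rewrite author's own statement) =====
-- stated objective: alternative
-- what changed: Replaces the negated min-heap with a plain list and a linear max-scan per iteration (find max, overwrite it in place with its floor half), accumulating by addition instead of subtracting negated pops; the input list is not mutated.
import Mathlib
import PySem

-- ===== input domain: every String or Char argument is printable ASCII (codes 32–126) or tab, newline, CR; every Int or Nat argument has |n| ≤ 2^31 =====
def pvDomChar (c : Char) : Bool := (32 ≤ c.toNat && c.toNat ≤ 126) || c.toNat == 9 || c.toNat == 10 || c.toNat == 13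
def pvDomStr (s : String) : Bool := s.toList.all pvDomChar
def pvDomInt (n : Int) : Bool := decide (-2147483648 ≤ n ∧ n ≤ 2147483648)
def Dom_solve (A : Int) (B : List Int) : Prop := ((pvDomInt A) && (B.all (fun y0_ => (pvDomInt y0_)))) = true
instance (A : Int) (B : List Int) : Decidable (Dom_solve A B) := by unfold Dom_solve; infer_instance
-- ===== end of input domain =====

-- B replaces the negated min-heap with repeated linear max-scans over a plain list (alternative decomposition; return value only — A heapifies a local negated copy, B does not mutate its input).


-- ===== PORT A =====
-- heapq is modelled by its contract on the multiset of heap contents: heappop removes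
-- (the first occurrence of) the minimum, heappush adds an element; the loop runs while
-- A > 0 and the heap holds more than one element, so fuel A.toNat is exact.
def minIn (x : Int) (l : List Int) : Int := l.foldl min x

def loopA : Nat → List Int → Int → Int
  | 0, _, t => t
  | a + 1, C, t =>
    if C.length > 1 then
      match C with
      | [] => t
      | c :: cs =>
        let chocolet := minIn c cs                               -- heapq.heappop(B)
        loopA a (((c :: cs).erase chocolet) ++ [-(PySem.Int.floordiv (-chocolet) 2)])  -- heappush(B, -(-chocolet // 2))
          (t - chocolet)
    else t

def solve (A : Int) (B : List Int) : Int :=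
  loopA A.toNat (B.map (fun b => b * -1)) 0

-- ===== PORT B =====
def maxIn (x : Int) (l : List Int) : Int := l.foldl max x

-- C[C.index(m)] = v
def replaceFirst : List Int → Int → Int → List Int
  | [], _, _ => []
  | x :: xs, m, v => if x = m then v :: xs else x :: replaceFirst xs m v

def loopB : Nat → List Int → Int → Int
  | 0, _, t => t
  | a + 1, D, t =>
    if D.length > 1 then
      match D with
      | [] => t
      | d :: ds =>
        let m := maxIn d ds                                       -- linear max-scan
        loopB a (replaceFirst (d :: ds) m (PySem.Int.floordiv m 2)) (t + m)
    else t

def solve_alt (A : Int) (B : List Int) : Int :=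
  loopB A.toNat B 0

-- ===== PRECONDITION & SPEC =====
def Spec_solve (A : Int) (B : List Int) (out : Int) : Prop := out = solve_alt A B
instance (A : Int) (B : List Int) (out : Int) : Decidable (Spec_solve A B out) := by unfold Spec_solve; infer_instance

-- ===== CLAIM (what is proved, stated in full; the proofs are below) =====
def Claim_equal_solve : Prop := ∀ (A : Int) (B : List Int), Dom_solve A B → Spec_solve A B (solve A B)

-- ===== LEMMAS AND PROOFS =====

theorem minIn_mem (x : Int) (l : List Int) : minIn x l ∈ x :: l := by
  induction l generalizing x with
  | nil => simp [minIn]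
  | cons y ys ih =>
    have hstep : minIn x (y :: ys) = minIn (min x y) ys := rfl
    rw [hstep]
    rcases List.mem_cons.1 (ih (min x y)) with h1 | h1
    · rw [h1]
      rcases le_total x y with hxy | hxy
      · rw [min_eq_left hxy]; exact List.mem_cons_self
      · rw [min_eq_right hxy]
        exact List.mem_cons_of_mem _ List.mem_cons_self
    · exact List.mem_cons_of_mem _ (List.mem_cons_of_mem _ h1)

theorem minIn_le (x : Int) (l : List Int) : ∀ y ∈ x :: l, minIn x l ≤ y := by
  induction l generalizing x with
  | nil => simp [minIn]
  | cons z zs ih =>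
    intro y hy
    have h := ih (min x z)
    simp [minIn, List.foldl_cons]
    rcases List.mem_cons.1 hy with h1 | h1
    · subst h1
      exact le_trans (h _ (List.mem_cons_self)) (min_le_left _ _)
    · rcases List.mem_cons.1 h1 with h2 | h2
      · subst h2
        exact le_trans (h _ (List.mem_cons_self)) (min_le_right _ _)
      · exact h _ (List.mem_cons_of_mem _ h2)

theorem maxIn_mem (x : Int) (l : List Int) : maxIn x l ∈ x :: l := by
  induction l generalizing x with
  | nil => simp [maxIn]
  | cons y ys ih =>
    have hstep : maxIn x (y :: ys) = maxIn (max x y) ys := rfl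
    rw [hstep]
    rcases List.mem_cons.1 (ih (max x y)) with h1 | h1
    · rw [h1]
      rcases le_total x y with hxy | hxy
      · rw [max_eq_right hxy]
        exact List.mem_cons_of_mem _ List.mem_cons_self
      · rw [max_eq_left hxy]; exact List.mem_cons_self
    · exact List.mem_cons_of_mem _ (List.mem_cons_of_mem _ h1)

theorem le_maxIn (x : Int) (l : List Int) : ∀ y ∈ x :: l, y ≤ maxIn x l := by
  induction l generalizing x with
  | nil => simp [maxIn]
  | cons z zs ih =>
    intro y hy
    have h := ih (max x z)
    simp [maxIn, List.foldl_cons]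
    rcases List.mem_cons.1 hy with h1 | h1
    · subst h1
      exact le_trans (le_max_left _ _) (h _ (List.mem_cons_self))
    · rcases List.mem_cons.1 h1 with h2 | h2
      · subst h2
        exact le_trans (le_max_right _ _) (h _ (List.mem_cons_self))
      · exact h _ (List.mem_cons_of_mem _ h2)

theorem replaceFirst_perm (l : List Int) (m v : Int) (hm : m ∈ l) :
    (replaceFirst l m v).Perm (v :: l.erase m) := by
  induction l with
  | nil => cases hm
  | cons x xs ih =>
    by_cases hx : x = m
    · subst hx
      simp [replaceFirst, List.erase_cons_head]
    · have hm' : m ∈ xs := by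
        rcases List.mem_cons.1 hm with h | h
        · exact absurd h.symm hx
        · exact h
      have : (x :: xs).erase m = x :: xs.erase m := by
        rw [List.erase_cons_tail]
        simp [hx]
      rw [this]
      simp only [replaceFirst, if_neg hx]
      exact ((ih hm').cons x).trans (List.Perm.swap v x _)

theorem key_step (C D : List Int) (c d : Int) (cs ds : List Int)
    (hC : C = c :: cs) (hD : D = d :: ds) (hperm : C.Perm (D.map (fun b => b * -1))) :
    minIn c cs = -(maxIn d ds) ∧
    (((c :: cs).erase (minIn c cs)) ++ [-(PySem.Int.floordiv (-(minIn c cs)) 2)]).Perm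
      ((replaceFirst (d :: ds) (maxIn d ds) (PySem.Int.floordiv (maxIn d ds) 2)).map (fun b => b * -1)) := by
  subst hC hD
  set m := minIn c cs with hm
  set M := maxIn d ds with hM
  have hmmem : m ∈ c :: cs := minIn_mem c cs
  have hMmem : M ∈ d :: ds := maxIn_mem d ds
  -- m = -M
  have hMneg : -M ∈ (c :: cs) := by
    refine hperm.symm.mem_iff.1 ?_
    exact List.mem_map.2 ⟨M, hMmem, by ring⟩
  have hmD : -m ∈ d :: ds := by
    have := hperm.mem_iff.1 hmmem
    rcases List.mem_map.1 this with ⟨b, hb, hbeq⟩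
    have : b = -m := by linarith [hbeq]
    rwa [this] at hb
  have h1 : m ≤ -M := minIn_le c cs _ hMneg
  have h2 : -m ≤ M := le_maxIn d ds _ hmD
  have hmM : m = -M := by omega
  refine ⟨hmM, ?_⟩
  -- multiset step
  have inj : Function.Injective (fun b : Int => b * -1) := by
    intro a b h; simpa using h
  have herase : ((c :: cs).erase m).Perm (((d :: ds).erase M).map (fun b => b * -1)) := by
    have h3 : ((c :: cs).erase m).Perm (((d :: ds).map (fun b => b * -1)).erase m) :=
      hperm.erase m
    have h4 : ((d :: ds).map (fun b => b * -1)).erase m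
        = ((d :: ds).erase M).map (fun b => b * -1) := by
      rw [hmM]
      have := (List.map_erase inj (l := d :: ds) (a := M)).symm
      simpa using this
    rw [h4] at h3
    exact h3
  have hval : -(PySem.Int.floordiv (-m) 2) = (PySem.Int.floordiv M 2) * -1 := by
    rw [hmM]; ring_nf
  refine (List.perm_append_singleton _ _).trans ?_
  rw [hval]
  refine (herase.cons _).trans ?_
  have hmapcons : ((PySem.Int.floordiv M 2) * -1 :: ((d :: ds).erase M).map (fun b => b * -1))
      = ((PySem.Int.floordiv M 2) :: (d :: ds).erase M).map (fun b => b * -1) := by simp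
  rw [hmapcons]
  exact ((replaceFirst_perm _ M _ hMmem).map _).symm

theorem loop_eq (a : Nat) : ∀ (C D : List Int) (t : Int),
    C.Perm (D.map (fun b => b * -1)) → loopA a C t = loopB a D t := by
  induction a with
  | zero => intro C D t _; rfl
  | succ a ih =>
    intro C D t hperm
    have hlen : C.length = D.length := by
      simpa using hperm.length_eq
    by_cases hgt : D.length > 1
    · have hgtC : C.length > 1 := by omega
      rcases C with _ | ⟨c, cs⟩
      · simp at hgtC
      rcases D with _ | ⟨d, ds⟩
      · simp at hgt
      obtain ⟨hval, hstep⟩ := key_step _ _ c d cs ds rfl rfl hperm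
      simp only [loopA, loopB, if_pos hgtC, if_pos hgt]
      rw [ih _ _ _ hstep, hval]
      ring_nf
    · have hgtC : ¬ C.length > 1 := by omega
      simp only [loopA, loopB, if_neg hgt, if_neg hgtC]

-- ===== VERDICT (by name: the statement is the Claim_ definition above) =====
theorem solve_spec : Claim_equal_solve := by
  intro A B _
  unfold Spec_solve solve solve_alt
  exact loop_eq A.toNat _ B 0 (List.Perm.refl _)
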